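-- pv_equiv track=rewrite | github.com/alexsotocx/algorithms | Topcoder/Python/MultiRead.py | minCycles
-- ===== SOURCE A (Python) =====
-- def minCycles(trace, procs):
--   coun = 0
--   i = 0
--   while i < len(trace):
--     if trace[i] == 'W':
--       coun += 1
--       i+=1
--     else:
--       j = procs - 1
--       i += 1
--       while j > 0 and i< len(trace) and trace[i] == 'R':
--         j -= 1
--         i += 1
--       coun += 1
--   return coun
-- ===== SOURCE B (Python) =====
-- def minCycles(trace, procs):
--     coun = 0
--     remaining = 0
--     for c in trace:
--         if c == 'W':
--             coun += 1
--             remaining = 0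
--         elif c == 'R' and remaining > 0:
--             remaining -= 1
--         else:
--             coun += 1
--             remaining = procs - 1
--     return coun
-- ===== Notes on version B (the rewrite author's own statement) =====
-- stated objective: simpler
-- what changed: Replaced the nested index-based while loops with a single flat for-pass over the characters keeping a 'remaining' counter for how many more R's the open read-cycle may absorb.
import Mathlib
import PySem

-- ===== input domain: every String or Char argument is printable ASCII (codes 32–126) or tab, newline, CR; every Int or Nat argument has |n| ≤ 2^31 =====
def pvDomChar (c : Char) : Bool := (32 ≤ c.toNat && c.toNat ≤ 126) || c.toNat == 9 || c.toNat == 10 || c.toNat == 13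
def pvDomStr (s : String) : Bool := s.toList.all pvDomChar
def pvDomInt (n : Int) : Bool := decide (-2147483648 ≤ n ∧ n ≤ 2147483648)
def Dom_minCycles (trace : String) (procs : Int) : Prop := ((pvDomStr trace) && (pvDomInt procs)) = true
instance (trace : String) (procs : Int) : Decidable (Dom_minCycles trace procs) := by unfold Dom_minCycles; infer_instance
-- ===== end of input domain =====

-- B replaces A's nested index-based while loops with one flat pass keeping a
-- 'remaining' counter of R's the open read-cycle may still absorb (objective: simpler).

-- ===== PORT A =====
-- A's inner while: absorb up to j following 'R's, returning the rest of the trace.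
def minCyclesInner (j : Int) (cs : List Char) : List Char :=
  match cs with
  | [] => []
  | c :: rest => if j > 0 ∧ c = 'R' then minCyclesInner (j - 1) rest else c :: rest

theorem minCyclesInner_length_le (j : Int) (cs : List Char) :
    (minCyclesInner j cs).length ≤ cs.length := by
  induction cs generalizing j with
  | nil => simp [minCyclesInner]
  | cons c rest ih =>
    simp only [minCyclesInner]
    split
    · exact Nat.le_trans (ih _) (Nat.le_succ _)
    · exact Nat.le_refl _

-- A's outer while over the remaining characters, threading the counter.
def minCyclesOuter (procs : Int) (cs : List Char) (coun : Int) : Int :=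
  match cs with
  | [] => coun
  | c :: rest =>
    if c = 'W' then minCyclesOuter procs rest (coun + 1)
    else minCyclesOuter procs (minCyclesInner (procs - 1) rest) (coun + 1)
termination_by cs.length
decreasing_by
  · simp
  · exact Nat.lt_succ_of_le (minCyclesInner_length_le _ _)

def minCycles (trace : String) (procs : Int) : Int :=
  minCyclesOuter procs trace.toList 0

-- ===== PORT B =====
def minCyclesStep (procs : Int) (s : Int × Int) (c : Char) : Int × Int :=
  if c = 'W' then (s.1 + 1, 0)
  else if c = 'R' ∧ s.2 > 0 then (s.1, s.2 - 1)
  else (s.1 + 1, procs - 1)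

def minCycles_alt (trace : String) (procs : Int) : Int :=
  (trace.toList.foldl (minCyclesStep procs) (0, 0)).1

-- ===== PRECONDITION & SPEC =====
def Spec_minCycles (trace : String) (procs : Int) (out : Int) : Prop := out = minCycles_alt trace procs
instance (trace : String) (procs : Int) (out : Int) : Decidable (Spec_minCycles trace procs out) := by unfold Spec_minCycles; infer_instance

-- ===== CLAIM (what is proved, stated in full; the proofs are below) =====
def Claim_equal_minCycles : Prop := ∀ (trace : String) (procs : Int), Dom_minCycles trace procs → Spec_minCycles trace procs (minCycles trace procs)

-- ===== LEMMAS AND PROOFS =====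
theorem minCyclesInner_nonpos (j : Int) (cs : List Char) (h : ¬ j > 0) :
    minCyclesInner j cs = cs := by
  cases cs with
  | nil => rfl
  | cons c rest => simp [minCyclesInner, h]

-- Invariant: folding B's step from state (coun, j) equals A resumed mid-group
-- with j absorbable R's left.
theorem fold_eq_outer (procs : Int) (cs : List Char) (j coun : Int) :
    (cs.foldl (minCyclesStep procs) (coun, j)).1
      = minCyclesOuter procs (minCyclesInner j cs) coun := by
  induction cs generalizing j coun with
  | nil => simp [minCyclesInner, minCyclesOuter]
  | cons c rest ih =>
    by_cases hw : c = 'W'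
    · subst hw
      have hstep : minCyclesStep procs (coun, j) 'W' = (coun + 1, 0) := by
        simp [minCyclesStep]
      have hin : minCyclesInner j ('W' :: rest) = 'W' :: rest := by
        simp [minCyclesInner]
      rw [List.foldl_cons, hstep, ih 0 (coun + 1),
        minCyclesInner_nonpos 0 rest (by omega), hin]
      simp [minCyclesOuter]
    · by_cases hr : c = 'R' ∧ j > 0
      · have : minCyclesStep procs (coun, j) c = (coun, j - 1) := by
          simp [minCyclesStep, hr]
        rw [List.foldl_cons, this, ih (j - 1) coun]
        have : minCyclesInner j (c :: rest) = minCyclesInner (j - 1) rest := by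
          simp [minCyclesInner, hr.1, hr.2]
        rw [this]
      · have hstep : minCyclesStep procs (coun, j) c = (coun + 1, procs - 1) := by
          simp only [minCyclesStep]
          rw [if_neg hw, if_neg hr]
        have hin : minCyclesInner j (c :: rest) = c :: rest := by
          simp only [minCyclesInner]
          rw [if_neg (by tauto)]
        rw [List.foldl_cons, hstep, ih (procs - 1) (coun + 1), hin]
        simp [minCyclesOuter, hw]

-- ===== VERDICT (by name: the statement is the Claim_ definition above) =====
theorem minCycles_spec : Claim_equal_minCycles := by
  intro trace procs _
  unfold Spec_minCycles minCycles minCycles_alt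
  rw [fold_eq_outer, minCyclesInner_nonpos 0 _ (by omega)]
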